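-- pv_equiv track=rewrite | github.com/liulizhi1996/ASIRS | stemming.py | end_cvc
-- ===== SOURCE A (Python) =====
-- def end_cvc(word, i):
--     if i >= 2:
--         if word[i] not in {'a', 'e', 'i', 'o', 'u', 'y', 'w', 'x'}:
--             if word[i-1] in {'a', 'e', 'i', 'o', 'u', 'y'}:
--                 if word[i-2] not in {'a', 'e', 'i', 'o', 'u'}:
--                     if word[i-2] == 'y':
--                         consonant = 0
--                         for j in range(i-2):
--                             if word[j] not in {'a', 'e', 'i', 'o', 'u'}:
--                                 if word[j] == 'y':
--                                     if consonant == 1: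
--                                         consonant = 0
--                                     else:
--                                         consonant = 1
--                                 else:
--                                     consonant = 1
--                             else:
--                                 consonant = 0
--                         if consonant == 0:
--                             return 1
--                     else:
--                         return 1
--     return 0
-- ===== SOURCE B (Python) =====
-- def end_cvc(word, i):
--     if i < 2:
--         return 0
--     vowels = {'a', 'e', 'i', 'o', 'u'}
--
--     def is_cons(k):
--         c = word[k]
--         if c in vowels:
--             return False
--         if c == 'y':
--             return True if k == 0 else not is_cons(k - 1)
--         return True
--
--     if (word[i] not in {'a', 'e', 'i', 'o', 'u', 'y', 'w', 'x'}
--             and word[i - 1] in {'a', 'e', 'i', 'o', 'u', 'y'}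
--             and is_cons(i - 2)):
--         return 1
--     return 0
-- ===== Notes on version B (the rewrite author's own statement) =====
-- stated objective: simpler
-- what changed: Replaces A's four nested ifs plus an explicit forward y-toggling loop over the whole prefix with one flat boolean condition and a small backward recursion is_cons(k) that decides consonant-hood of position i-2 directly (recursing only through a run of 'y's).
import Mathlib
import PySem

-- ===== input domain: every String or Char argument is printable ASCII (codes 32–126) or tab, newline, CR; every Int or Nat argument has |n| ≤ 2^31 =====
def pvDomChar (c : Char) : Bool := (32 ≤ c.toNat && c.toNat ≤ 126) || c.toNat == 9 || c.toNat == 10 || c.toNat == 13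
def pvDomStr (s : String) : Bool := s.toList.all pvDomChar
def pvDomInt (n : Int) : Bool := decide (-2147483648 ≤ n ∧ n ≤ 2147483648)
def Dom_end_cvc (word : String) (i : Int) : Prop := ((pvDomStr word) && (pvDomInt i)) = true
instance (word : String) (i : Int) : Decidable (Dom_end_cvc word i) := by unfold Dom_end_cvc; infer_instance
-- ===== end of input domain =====

-- B flattens A's nested ifs into one condition and replaces A's forward y-toggling
-- prefix loop with a backward recursion deciding consonant-hood of position i-2.

-- ===== PORT A =====
-- the body of A's for-loop over range(i-2), updating the 'consonant' flag
def endCvcStep (word : String) (consonant : Int) (j : Int) : Int :=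
  if ¬ (['a','e','i','o','u'].contains ((PySem.Str.pyGet? word j).getD ' ') = true) then
    if (PySem.Str.pyGet? word j).getD ' ' = 'y' then
      if consonant = 1 then 0 else 1
    else 1
  else 0

def end_cvc (word : String) (i : Int) : Int :=
  if i ≥ 2 then
    if ¬ (['a','e','i','o','u','y','w','x'].contains ((PySem.Str.pyGet? word i).getD ' ') = true) then
      if ['a','e','i','o','u','y'].contains ((PySem.Str.pyGet? word (i-1)).getD ' ') = true then
        if ¬ (['a','e','i','o','u'].contains ((PySem.Str.pyGet? word (i-2)).getD ' ') = true) then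
          if (PySem.Str.pyGet? word (i-2)).getD ' ' = 'y' then
            if ((PySem.List.pyRange 0 (i-2) 1).foldl (endCvcStep word) 0) = 0 then 1 else 0
          else 1
        else 0
      else 0
    else 0
  else 0

-- ===== PORT B =====
-- recursive helper is_cons(k) of Source B (its k is always ≥ 0, so Nat recursion on the index)
def isConsB (word : String) : Nat → Bool
  | 0 =>
    if ['a','e','i','o','u'].contains ((PySem.Str.pyGet? word (0 : Int)).getD ' ') then false
    else true  -- at k = 0, 'y' and any other non-vowel alike give True
  | k + 1 =>
    let c := (PySem.Str.pyGet? word ((k : Int) + 1)).getD ' '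
    if ['a','e','i','o','u'].contains c then false
    else if c = 'y' then !(isConsB word k)
    else true

def end_cvc_alt (word : String) (i : Int) : Int :=
  if i < 2 then 0
  else if (!(['a','e','i','o','u','y','w','x'].contains ((PySem.Str.pyGet? word i).getD ' ')))
        && (['a','e','i','o','u','y'].contains ((PySem.Str.pyGet? word (i-1)).getD ' '))
        && isConsB word (i-2).toNat
  then 1 else 0

-- ===== PRECONDITION & SPEC =====
-- Pre_ excludes exactly the inputs where Python A raises IndexError: i ≥ 2 but i out of range.
def Pre_end_cvc (word : String) (i : Int) : Prop := 2 ≤ i → i < (word.toList.length : Int)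
instance (word : String) (i : Int) : Decidable (Pre_end_cvc word i) := by unfold Pre_end_cvc; infer_instance
def pvWitness_end_cvc : String × Int := ("rap", 2)

def Spec_end_cvc (word : String) (i : Int) (out : Int) : Prop := out = end_cvc_alt word i
instance (word : String) (i : Int) (out : Int) : Decidable (Spec_end_cvc word i out) := by unfold Spec_end_cvc; infer_instance

-- ===== CLAIM (what is proved, stated in full; the proofs are below) =====
def Claim_equal_end_cvc : Prop := ∀ (word : String) (i : Int), Dom_end_cvc word i → Pre_end_cvc word i → Spec_end_cvc word i (end_cvc word i)

-- ===== LEMMAS AND PROOFS =====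

-- one-step unfolding of isConsB with the index written as a plain cast
lemma isConsB_eq (word : String) (k : Nat) :
    isConsB word k =
      (if ['a','e','i','o','u'].contains ((PySem.Str.pyGet? word (k : Int)).getD ' ') then false
       else if (PySem.Str.pyGet? word (k : Int)).getD ' ' = 'y' then
         (if k = 0 then true else !(isConsB word (k-1)))
       else true) := by
  cases k with
  | zero => simp [isConsB]
  | succ k => simp [isConsB]; rfl

set_option maxHeartbeats 1000000 in
-- A's loop over range(n+1) leaves the flag at 1 iff position n is a consonant in B's sense
lemma fold_step_eq (word : String) (n : Nat) :
    (PySem.List.pyRange 0 ((n : Int) + 1) 1).foldl (endCvcStep word) 0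
      = (if isConsB word n then 1 else 0) := by
  induction n with
  | zero =>
    rw [PySem.List.pyRange_one_cons (by norm_num), PySem.List.pyRange_one_eq_nil (by norm_num)]
    simp only [List.foldl_cons, List.foldl_nil]
    rw [isConsB_eq word 0]
    simp only [Nat.cast_zero]
    unfold endCvcStep
    split_ifs <;> simp_all
  | succ k ih =>
    have hc : ((k + 1 : Nat) : Int) + 1 = ((k : Int) + 1) + 1 := by push_cast; ring
    rw [hc, PySem.List.pyRange_one_succ_right (by positivity), List.foldl_append, ih]
    simp only [List.foldl_cons, List.foldl_nil]
    rw [isConsB_eq word (k+1), if_neg (Nat.succ_ne_zero k)]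
    simp only [Nat.add_sub_cancel, Nat.cast_add, Nat.cast_one]
    unfold endCvcStep
    cases h : isConsB word k <;> split_ifs <;> simp_all

lemma main_eq (word : String) (i : Int) (hi : 2 ≤ i) :
    end_cvc word i = end_cvc_alt word i := by
  unfold end_cvc end_cvc_alt
  rw [if_pos hi, if_neg (show ¬ i < 2 by omega)]
  by_cases hA : (['a','e','i','o','u','y','w','x'].contains ((PySem.Str.pyGet? word i).getD ' ')) = true
  · rw [if_neg (not_not_intro hA),
      if_neg (show ¬ _ = true by rw [hA]; simp only [Bool.not_true, Bool.false_and]; exact Bool.false_ne_true)]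
  have hA' : (['a','e','i','o','u','y','w','x'].contains ((PySem.Str.pyGet? word i).getD ' ')) = false := by
    revert hA; cases (['a','e','i','o','u','y','w','x'].contains ((PySem.Str.pyGet? word i).getD ' ')) <;> simp
  rw [if_pos hA]
  by_cases hB : (['a','e','i','o','u','y'].contains ((PySem.Str.pyGet? word (i-1)).getD ' ')) = true
  swap
  · have hB' : (['a','e','i','o','u','y'].contains ((PySem.Str.pyGet? word (i-1)).getD ' ')) = false := by
      revert hB; cases (['a','e','i','o','u','y'].contains ((PySem.Str.pyGet? word (i-1)).getD ' ')) <;> simp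
    rw [if_neg hB,
      if_neg (show ¬ _ = true by
        rw [hA', hB']; simp only [Bool.not_false, Bool.true_and, Bool.false_and]; exact Bool.false_ne_true)]
  rw [if_pos hB]
  have hbool : ((!(['a','e','i','o','u','y','w','x'].contains ((PySem.Str.pyGet? word i).getD ' ')))
        && (['a','e','i','o','u','y'].contains ((PySem.Str.pyGet? word (i-1)).getD ' '))
        && isConsB word (i-2).toNat) = isConsB word (i-2).toNat := by
    rw [hA', hB]; simp only [Bool.not_false, Bool.true_and]
  rw [hbool]
  have hcast : (((i-2).toNat : Nat) : Int) = i - 2 := by omega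
  rw [isConsB_eq, hcast]
  by_cases hV : (['a','e','i','o','u'].contains ((PySem.Str.pyGet? word (i-2)).getD ' ')) = true
  · rw [if_neg (not_not_intro hV), if_pos hV]
    simp
  rw [if_pos hV, if_neg hV]
  by_cases hY : (PySem.Str.pyGet? word (i-2)).getD ' ' = 'y'
  swap
  · rw [if_neg hY, if_neg hY]
    simp
  rw [if_pos hY, if_pos hY]
  by_cases h0 : (i - 2).toNat = 0
  · rw [if_pos h0, show i - 2 = 0 by omega, PySem.List.pyRange_one_eq_nil (by norm_num)]
    simp
  · rw [if_neg h0]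
    obtain ⟨k, hk⟩ : ∃ k : Nat, (i-2).toNat = k + 1 := ⟨(i-2).toNat - 1, by omega⟩
    have h2 : i - 2 = (k : Int) + 1 := by omega
    rw [h2, fold_step_eq, show ((k:Int)+1).toNat = k + 1 by omega]
    simp only [Nat.add_sub_cancel]
    cases h : isConsB word k <;> simp_all

-- ===== VERDICT (by name: the statement is the Claim_ definition above) =====
theorem end_cvc_spec : Claim_equal_end_cvc := by
  intro word i _ _
  unfold Spec_end_cvc
  by_cases hi : 2 ≤ i
  · exact main_eq word i hi
  · unfold end_cvc end_cvc_alt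
    rw [if_neg (show ¬ i ≥ 2 by omega), if_pos (show i < 2 by omega)]
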